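-- pv_equiv track=rewrite | github.com/yashhashhrrreee/6Companies30Days | Amazon/09 Most Popular Video Creator.py | mostPopularCreator
-- ===== SOURCE A (Python) =====
-- from typing import List
--
-- def mostPopularCreator(creators: List[str], ids: List[str], views: List[int]) -> List[List[str]]:
--     res={}
--     total = -1
--     for i in range(len(creators)):
--         if creators[i] in res:
--             res[creators[i]][0] += views[i]
--             if res[creators[i]][2] < views[i]:
--                 res[creators[i]][1] = ids[i]
--                 res[creators[i]][2] = views[i]
--             elif res[creators[i]][2] == views[i]:
--                 res[creators[i]][1] = min(res[creators[i]][1],ids[i])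
--         else:
--             res[creators[i]] = [views[i],ids[i],views[i]]
--         total = max(res[creators[i]][0],total)
--
--     result = []
--     for i in res:
--         if res[i][0] == total:
--             result.append([i,res[i][1]])
--     return result
-- ===== SOURCE B (Python) =====
-- def mostPopularCreator(creators, ids, views):
--     popularity = {}   # creator -> current view total
--     threshold = -1    # highest total any creator has reached so far
--     for c, v in zip(creators, views):
--         popularity[c] = popularity.get(c, 0) + v
--         threshold = max(threshold, popularity[c])
--     best = {}         # creator -> (views, id) of their best video, min id on ties
--     for c, i, v in zip(creators, ids, views):
--         if c not in best or (v, best[c][1]) > (best[c][0], i):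
--             best[c] = (v, i)
--     return [[c, best[c][1]] for c, t in popularity.items() if t == threshold]
-- ===== Notes on version B (the rewrite author's own statement) =====
-- stated objective: simpler
-- what changed: A interleaves grouping, best-id tie handling and the qualifying threshold in one indexed loop over a dict of mutable [total, id, maxview] triples; B separates the concerns into two plain zip passes -- one accumulating per-creator totals while tracking the running high-water mark that serves as the qualifying threshold, one keeping each creator's (views, id) best pair via a single lexicographic tuple comparison -- and emits the answer with a comprehension. …
-- outside the precondition, e.g. on mostPopularCreator(['a', 'a'], ['x'], [2, 1]): A returns [['a', 'x']], B returns [['a', 'x']]; on mostPopularCreator(['a'], ['x'], []): A raises IndexError, B returns []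
import Mathlib
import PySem

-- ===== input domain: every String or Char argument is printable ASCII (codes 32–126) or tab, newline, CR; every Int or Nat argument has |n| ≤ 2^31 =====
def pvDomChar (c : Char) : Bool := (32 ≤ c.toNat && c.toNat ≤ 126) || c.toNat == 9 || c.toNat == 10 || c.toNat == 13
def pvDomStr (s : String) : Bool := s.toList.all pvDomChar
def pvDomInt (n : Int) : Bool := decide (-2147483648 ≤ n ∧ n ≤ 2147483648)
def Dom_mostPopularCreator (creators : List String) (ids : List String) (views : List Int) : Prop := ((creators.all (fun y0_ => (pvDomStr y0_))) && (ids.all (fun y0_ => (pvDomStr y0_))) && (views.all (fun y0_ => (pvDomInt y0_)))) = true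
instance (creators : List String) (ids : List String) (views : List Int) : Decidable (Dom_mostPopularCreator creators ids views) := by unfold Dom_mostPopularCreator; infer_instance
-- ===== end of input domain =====

-- B replaces A's single indexed loop over a dict of mutable [total, best-id, max-view] triples by
-- two plain zip passes -- totals with their running high-water mark (the qualifying threshold),
-- then each creator's best (views, id) pair via one lexicographic comparison -- and a final
-- comprehension.  Objective: simpler.

-- ===== PORT A =====
def mostPopularCreator (creators : List String) (ids : List String) (views : List Int) : List (List String) :=
  let step := fun (st : PySem.Dict String (Int × String × Int) × Int) (i : Int) =>
    let c := PySem.List.pyGetD creators i ""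
    let idv := PySem.List.pyGetD ids i ""
    let v := PySem.List.pyGetD views i 0
    let res := st.1
    let res' :=
      match res.get? c with
      | some (s, b, m) =>
          if m < v then res.insert c (s + v, idv, v)
          else if m = v then res.insert c (s + v, (if idv < b then idv else b), m)
          else res.insert c (s + v, b, m)
      | none => res.insert c (v, idv, v)
    (res', max (res'.getD c (0, "", 0)).1 st.2)
  let fin := (PySem.List.pyRange 0 (creators.length : Int) 1).foldl step (PySem.Dict.empty, -1)
  fin.1.items.foldl (fun acc p => if p.2.1 = fin.2 then acc ++ [[p.1, p.2.2.1]] else acc) []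

-- ===== PORT B =====
def mostPopularCreator_alt (creators : List String) (ids : List String) (views : List Int) : List (List String) :=
  let pop := (creators.zip views).foldl
    (fun (st : PySem.Dict String Int × Int) p =>
      let d := st.1.insert p.1 (st.1.getD p.1 0 + p.2)
      (d, max st.2 (d.getD p.1 0)))
    (PySem.Dict.empty, -1)
  let best := (creators.zip (ids.zip views)).foldl
    (fun (b : PySem.Dict String (Int × String)) t =>
      match b.get? t.1 with
      | none => b.insert t.1 (t.2.2, t.2.1)
      | some mi =>
          if mi.1 < t.2.2 ∨ (t.2.2 = mi.1 ∧ t.2.1 < mi.2) then b.insert t.1 (t.2.2, t.2.1)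
          else b)
    PySem.Dict.empty
  -- best[c] in the comprehension: the key is always present (same keys as popularity), so
  -- Python's best[c] never raises; ported as getD with an unreachable default.
  pop.1.items.foldl
    (fun acc p => if p.2 = pop.2 then acc ++ [[p.1, (best.getD p.1 (0, "")).2]] else acc) []

-- ===== PRECONDITION & SPEC =====
-- A indexes views[i] and (on new-maximum or tie steps) ids[i] for i < len(creators): it raises
-- IndexError whenever views is shorter than creators, and on shorter ids except when tie
-- patterns happen to make the ids[i] access unreachable; Pre_ excludes exactly those ragged inputs.
def Pre_mostPopularCreator (creators : List String) (ids : List String) (views : List Int) : Prop :=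
  creators.length ≤ ids.length ∧ creators.length ≤ views.length
instance (creators : List String) (ids : List String) (views : List Int) : Decidable (Pre_mostPopularCreator creators ids views) := by unfold Pre_mostPopularCreator; infer_instance

def pvWitness_mostPopularCreator : List String × List String × List Int :=
  (["a", "a", "b"], ["y", "x", "z"], [3, 3, 1])

def Spec_mostPopularCreator (creators : List String) (ids : List String) (views : List Int) (out : List (List String)) : Prop := out = mostPopularCreator_alt creators ids views
instance (creators : List String) (ids : List String) (views : List Int) (out : List (List String)) : Decidable (Spec_mostPopularCreator creators ids views out) := by unfold Spec_mostPopularCreator; infer_instance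

-- ===== CLAIM (what is proved, stated in full; the proofs are below) =====
def Claim_equal_mostPopularCreator : Prop := ∀ (creators : List String) (ids : List String) (views : List Int), Dom_mostPopularCreator creators ids views → Pre_mostPopularCreator creators ids views → Spec_mostPopularCreator creators ids views (mostPopularCreator creators ids views)

-- ===== LEMMAS AND PROOFS =====

-- The list of triples both programs conceptually run over.
def pvZ (creators ids : List String) (views : List Int) : List (String × String × Int) :=
  creators.zip (ids.zip views)

def pvPair (t : String × String × Int) : Int × String := (t.2.2, t.2.1)

-- keys in first-appearance order, and the per-creator (view, id) group
def pvKeys (L : List (String × String × Int)) : List String :=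
  PySem.Set.ofList (L.map (fun t => t.1))
def pvPairs (L : List (String × String × Int)) (c : String) : List (Int × String) :=
  (L.filter (fun t => t.1 == c)).map pvPair

-- A's per-step triple update, and the triple A holds for a group
def pvStepT (a : Int × String × Int) (q : Int × String) : Int × String × Int :=
  if a.2.2 < q.1 then (a.1 + q.1, q.2, q.1)
  else if a.2.2 = q.1 then (a.1 + q.1, (if q.2 < a.2.1 then q.2 else a.2.1), a.2.2)
  else (a.1 + q.1, a.2.1, a.2.2)
def pvTriple : List (Int × String) → Int × String × Int
  | [] => (0, "", 0)
  | q :: qs => qs.foldl pvStepT (q.1, q.2, q.1)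

def pvSum (vs : List (Int × String)) : Int := (vs.map (fun q => q.1)).sum

def pvPeakAux (r acc : Int) : List (Int × String) → Int
  | [] => acc
  | q :: qs => pvPeakAux (r + q.1) (max acc (r + q.1)) qs
def pvPeak : List (Int × String) → Int
  | [] => -1
  | q :: qs => pvPeakAux q.1 q.1 qs

def pvMax : List (Int × String) → Int
  | [] => 0
  | q :: qs => (qs.map (fun q => q.1)).foldl max q.1
def pvBestList (vs : List (Int × String)) : List String :=
  (vs.filter (fun q => q.1 == pvMax vs)).map (fun q => q.2)
def pvBest (vs : List (Int × String)) : String :=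
  match pvBestList vs with
  | [] => ""
  | h :: t => t.foldl min h

-- A's canonical state after processing L
def pvStepA (st : PySem.Dict String (Int × String × Int) × Int) (t : String × String × Int) :
    PySem.Dict String (Int × String × Int) × Int :=
  let c := t.1
  let idv := t.2.1
  let v := t.2.2
  let res := st.1
  let res' :=
    match res.get? c with
    | some (s, b, m) =>
        if m < v then res.insert c (s + v, idv, v)
        else if m = v then res.insert c (s + v, (if idv < b then idv else b), m)
        else res.insert c (s + v, b, m)
    | none => res.insert c (v, idv, v)
  (res', max (res'.getD c (0, "", 0)).1 st.2)

def pvRes (L : List (String × String × Int)) : PySem.Dict String (Int × String × Int) :=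
  PySem.Dict.mk ((pvKeys L).map (fun c => (c, pvTriple (pvPairs L c))))
def pvTot (L : List (String × String × Int)) : Int :=
  ((pvKeys L).map (fun c => pvPeak (pvPairs L c))).foldl max (-1)

-- ---- small generic lemmas ----

theorem pv_foldl_max_swap (w : List Int) : ∀ (b x : Int),
    List.foldl max (max b x) w = max (List.foldl max b w) x := by
  induction w with
  | nil => intro b x; simp
  | cons y w ih => intro b x; simp only [List.foldl_cons]; rw [max_right_comm, ih]

theorem pv_tri_fold_nat {S : Type} (f : S → String → String → Int → S) :
    ∀ (cs is : List String) (vs : List Int) (init : S),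
      cs.length ≤ is.length → cs.length ≤ vs.length →
      (List.range cs.length).foldl
        (fun a k => f a (cs.getD k "") (is.getD k "") (vs.getD k 0)) init
      = (cs.zip (is.zip vs)).foldl (fun a t => f a t.1 t.2.1 t.2.2) init := by
  intro cs
  induction cs with
  | nil => intro is vs init _ _; simp
  | cons c cs ih =>
      intro is vs init h1 h2
      cases is with
      | nil => simp at h1
      | cons i is =>
        cases vs with
        | nil => simp at h2
        | cons v vs =>
            simp only [List.length_cons, List.range_succ_eq_map, List.foldl_cons,
              List.foldl_map, List.getD_cons_zero, List.getD_cons_succ,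
              List.zip_cons_cons]
            exact ih is vs _ (by simpa using h1) (by simpa using h2)
theorem pv_fold_eq_zip (creators ids : List String) (views : List Int) {S : Type}
    (f : S → String → String → Int → S) (init : S)
    (h1 : creators.length ≤ ids.length) (h2 : creators.length ≤ views.length) :
    (PySem.List.pyRange 0 (creators.length : Int) 1).foldl
      (fun a i => f a (PySem.List.pyGetD creators i "") (PySem.List.pyGetD ids i "")
                      (PySem.List.pyGetD views i 0)) init
    = (creators.zip (ids.zip views)).foldl (fun a t => f a t.1 t.2.1 t.2.2) init := by
  rw [PySem.List.pyRange_zero_nat, List.foldl_map]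
  rw [← pv_tri_fold_nat f creators ids views init h1 h2]
  apply PySem.List.foldl_congr_mem
  intro a k hk
  simp [PySem.List.pyGetD_natCast]
theorem pv_foldl_max_snoc (u : List Int) (a x : Int) :
    List.foldl max a (u ++ [x]) = max (List.foldl max a u) x := by
  simp [List.foldl_append]
theorem pv_foldl_max_pull (u w : List Int) (a x : Int) :
    List.foldl max a (u ++ x :: w) = max (List.foldl max a (u ++ w)) x := by
  simp only [List.foldl_append, List.foldl_cons]
  exact pv_foldl_max_swap w _ x
theorem pv_foldl_min_snoc (u : List String) (a x : String) :
    List.foldl min a (u ++ [x]) = min (List.foldl min a u) x := by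
  simp [List.foldl_append]
theorem pv_get?_mk_map {ν : Type} (ks : List String) (f : String → ν) (c : String)
    (hnd : ks.Nodup) :
    (PySem.Dict.mk (ks.map (fun k => (k, f k)))).get? c
      = if c ∈ ks then some (f c) else none := by
  induction ks with
  | nil => simp [PySem.Dict.get?]
  | cons k ks ih =>
      simp only [List.map_cons, PySem.Dict.get?_mk_cons]
      rcases eq_or_ne k c with rfl | hne
      · simp
      · simp only [beq_iff_eq, hne, if_false, List.mem_cons]
        rw [ih (List.nodup_cons.mp hnd).2]
        by_cases hc : c ∈ ks <;> simp [hc, Ne.symm hne]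
-- ---- group-level lemmas ----

theorem pv_stepT_fst (a : Int × String × Int) (q : Int × String) :
    (pvStepT a q).1 = a.1 + q.1 := by
  unfold pvStepT; split_ifs <;> rfl

theorem pv_fold_stepT_fst (qs : List (Int × String)) : ∀ (a : Int × String × Int),
    (qs.foldl pvStepT a).1 = a.1 + pvSum qs := by
  induction qs with
  | nil => intro a; simp [pvSum]
  | cons q qs ih =>
      intro a
      simp only [List.foldl_cons]
      rw [ih, pv_stepT_fst]
      simp [pvSum]; ring

theorem pv_peakAux_snoc (qs : List (Int × String)) : ∀ (r acc : Int) (q : Int × String),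
    pvPeakAux r acc (qs ++ [q]) = max (pvPeakAux r acc qs) (r + pvSum qs + q.1) := by
  induction qs with
  | nil => intro r acc q; simp [pvPeakAux, pvSum]
  | cons p ps ih =>
      intro r acc q
      simp only [List.cons_append, pvPeakAux]
      rw [ih]
      congr 1
      simp [pvSum]; ring

theorem pv_max_mem (vs : List (Int × String)) (h : vs ≠ []) :
    ∃ x ∈ vs, x.1 = pvMax vs := by
  cases vs with
  | nil => exact absurd rfl h
  | cons p ps =>
      rcases PySem.List.foldl_max_mem (ps.map (fun q => q.1)) p.1 with h1 | h1
      · exact ⟨p, List.mem_cons_self, h1.symm⟩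
      · rcases List.mem_map.mp h1 with ⟨x, hx, hx1⟩
        exact ⟨x, List.mem_cons_of_mem _ hx, hx1⟩

theorem pv_bestList_ne_nil (vs : List (Int × String)) (h : vs ≠ []) :
    pvBestList vs ≠ [] := by
  rcases pv_max_mem vs h with ⟨x, hx, hx1⟩
  unfold pvBestList
  simp only [ne_eq, List.map_eq_nil_iff, List.filter_eq_nil_iff, not_forall]
  exact ⟨x, hx, by simp [hx1]⟩

theorem pv_keys_mem (L : List (String × String × Int)) (c : String) :
    c ∈ pvKeys L ↔ ∃ t ∈ L, t.1 = c := by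
  unfold pvKeys
  rw [PySem.Set.mem_ofList]
  simp [eq_comm]

theorem pv_triple_fst (vs : List (Int × String)) : (pvTriple vs).1 = pvSum vs := by
  cases vs with
  | nil => simp [pvTriple, pvSum]
  | cons q qs => rw [pvTriple, pv_fold_stepT_fst]; simp [pvSum]
theorem pv_triple_snoc (vs : List (Int × String)) (q : Int × String) (h : vs ≠ []) :
    pvTriple (vs ++ [q]) = pvStepT (pvTriple vs) q := by
  cases vs with
  | nil => exact absurd rfl h
  | cons p ps => simp [pvTriple, List.foldl_append]
theorem pv_sum_snoc (vs : List (Int × String)) (q : Int × String) :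
    pvSum (vs ++ [q]) = pvSum vs + q.1 := by
  simp [pvSum]
theorem pv_peak_snoc (vs : List (Int × String)) (q : Int × String) (h : vs ≠ []) :
    pvPeak (vs ++ [q]) = max (pvPeak vs) (pvSum (vs ++ [q])) := by
  cases vs with
  | nil => exact absurd rfl h
  | cons p ps =>
      simp only [List.cons_append, pvPeak]
      rw [pv_peakAux_snoc]
      congr 1
      simp [pvSum]; ring
theorem pv_max_snoc (vs : List (Int × String)) (q : Int × String) (h : vs ≠ []) :
    pvMax (vs ++ [q]) = max (pvMax vs) q.1 := by
  cases vs with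
  | nil => exact absurd rfl h
  | cons p ps => simp [pvMax, List.foldl_append]
theorem pv_max_is_max (vs : List (Int × String)) : ∀ x ∈ vs, x.1 ≤ pvMax vs := by
  cases vs with
  | nil => simp
  | cons p ps =>
      intro x hx
      have h := PySem.List.le_foldl_max (ps.map (fun q => q.1)) p.1
      rcases List.mem_cons.mp hx with rfl | hmem
      · exact h.1
      · exact h.2 x.1 (List.mem_map_of_mem hmem)
theorem pv_triple_best (vs : List (Int × String)) (h : vs ≠ []) :
    (pvTriple vs).2 = (pvBest vs, pvMax vs) := by
  induction vs using List.reverseRecOn with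
  | nil => exact absurd rfl h
  | append_singleton vs q ih =>
      rcases eq_or_ne vs [] with rfl | hvs
      · simp [pvTriple, pvMax, pvBestList, pvBest]
      · rw [pv_triple_snoc vs q hvs, pv_max_snoc vs q hvs]
        have hm := pv_max_is_max vs
        have hbl := pv_bestList_ne_nil vs hvs
        unfold pvStepT
        rw [ih hvs]
        simp only
        rcases lt_trichotomy (pvMax vs) q.1 with hlt | heq | hgt
        · -- new strict maximum: best list is exactly [q.2]
          have hmax : max (pvMax vs) q.1 = q.1 := max_eq_right hlt.le
          have hfil : vs.filter (fun p => p.1 == max (pvMax vs) q.1) = [] := by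
            rw [List.filter_eq_nil_iff]
            intro x hx
            simp only [hmax, beq_iff_eq]
            exact ne_of_lt (lt_of_le_of_lt (hm x hx) hlt)
          have hbl' : pvBestList (vs ++ [q]) = [q.2] := by
            unfold pvBestList
            rw [pv_max_snoc vs q hvs, List.filter_append, hfil]
            simp [hmax]
          rw [if_pos hlt]
          simp [pvBest, hbl', hmax]
        · -- tie with the old maximum: best list grows by q.2
          have hmax : max (pvMax vs) q.1 = pvMax vs := max_eq_left heq.ge
          have hbl' : pvBestList (vs ++ [q]) = pvBestList vs ++ [q.2] := by
            unfold pvBestList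
            rw [pv_max_snoc vs q hvs, List.filter_append, hmax, List.map_append]
            simp [heq]
          rw [if_neg (by omega), if_pos heq]
          rcases List.exists_cons_of_ne_nil hbl with ⟨h0, t0, hbt⟩
          have : pvBest (vs ++ [q]) = min (pvBest vs) q.2 := by
            simp only [pvBest, hbl', hbt, List.cons_append]
            exact pv_foldl_min_snoc t0 h0 q.2
          rw [this, hmax]
          simp only [Prod.mk.injEq]
          refine ⟨?_, trivial⟩
          rcases lt_or_ge q.2 (pvBest vs) with hq | hq
          · rw [if_pos hq, min_eq_right hq.le]
          · rw [if_neg (not_lt.mpr hq), min_eq_left hq]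
        · -- below the old maximum: nothing changes
          have hmax : max (pvMax vs) q.1 = pvMax vs := max_eq_left hgt.le
          have hbl' : pvBestList (vs ++ [q]) = pvBestList vs := by
            unfold pvBestList
            rw [pv_max_snoc vs q hvs, List.filter_append, hmax]
            simp [ne_of_lt hgt]
          rw [if_neg (by omega), if_neg (by omega)]
          simp [pvBest, hbl', hmax]
-- ---- structure of pvKeys / pvPairs ----

theorem pv_keys_snoc (L : List (String × String × Int)) (t : String × String × Int) :
    pvKeys (L ++ [t]) = if t.1 ∈ pvKeys L then pvKeys L else pvKeys L ++ [t.1] := by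
  unfold pvKeys
  rw [List.map_append, PySem.Set.ofList_eq_foldl, List.foldl_append,
      ← PySem.Set.ofList_eq_foldl]
  simp only [List.map_cons, List.map_nil, List.foldl_cons, List.foldl_nil]
  rw [PySem.Set.add_eq_ite]
theorem pv_keys_nodup (L : List (String × String × Int)) : (pvKeys L).Nodup :=
  PySem.Set.nodup_ofList _
theorem pv_pairs_snoc (L : List (String × String × Int)) (t : String × String × Int)
    (c : String) :
    pvPairs (L ++ [t]) c = pvPairs L c ++ (if t.1 = c then [pvPair t] else []) := by
  unfold pvPairs
  rw [List.filter_append, List.map_append]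
  congr 1
  by_cases h : t.1 = c <;> simp [h]
theorem pv_pairs_ne_nil (L : List (String × String × Int)) (c : String)
    (hc : c ∈ pvKeys L) : pvPairs L c ≠ [] := by
  rcases (pv_keys_mem L c).mp hc with ⟨t, ht, rfl⟩
  unfold pvPairs
  simp only [ne_eq, List.map_eq_nil_iff, List.filter_eq_nil_iff, not_forall]
  exact ⟨t, ht, by simp⟩
theorem pv_pairs_nil_of_not_mem (L : List (String × String × Int)) (c : String)
    (hc : c ∉ pvKeys L) : pvPairs L c = [] := by
  unfold pvPairs
  simp only [List.map_eq_nil_iff, List.filter_eq_nil_iff]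
  intro t ht
  simp only [beq_iff_eq]
  intro h
  exact hc ((pv_keys_mem L c).mpr ⟨t, ht, h⟩)
-- ---- A's loop invariant ----

theorem pv_foldl_max_map_update (ks : List String) (hnd : ks.Nodup) (c : String)
    (hc : c ∈ ks) (g g' : String → Int) (s a : Int)
    (hsame : ∀ k ∈ ks, k ≠ c → g' k = g k) (hupd : g' c = max (g c) s) :
    (ks.map g').foldl max a = max ((ks.map g).foldl max a) s := by
  rcases List.append_of_mem hc with ⟨u, w, rfl⟩
  have hcu : c ∉ u := by
    intro h
    exact (List.disjoint_of_nodup_append hnd) h List.mem_cons_self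
  have hcw : c ∉ w := by
    have := (List.nodup_append.mp hnd).2.1
    simp only [List.nodup_cons] at this
    exact this.1
  have hu : u.map g' = u.map g :=
    List.map_congr_left (fun k hk => hsame k (List.mem_append_left _ hk)
      (fun h => hcu (h ▸ hk)))
  have hw : w.map g' = w.map g :=
    List.map_congr_left (fun k hk => hsame k
      (List.mem_append_right _ (List.mem_cons_of_mem _ hk)) (fun h => hcw (h ▸ hk)))
  rw [List.map_append, List.map_cons, hu, hw, pv_foldl_max_pull, hupd,
      List.map_append, List.map_cons, pv_foldl_max_pull, max_assoc]

theorem pv_res_keys (L : List (String × String × Int)) :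
    (pvRes L).keys = pvKeys L := by
  unfold pvRes PySem.Dict.keys
  simp [Function.comp_def]

theorem pv_res_contains (L : List (String × String × Int)) (c : String) :
    (pvRes L).contains c = decide (c ∈ pvKeys L) := by
  rw [PySem.Dict.contains_eq_decide_mem_keys, pv_res_keys]

theorem pv_A_invariant (L : List (String × String × Int)) :
    L.foldl pvStepA (PySem.Dict.empty, -1) = (pvRes L, pvTot L) := by
  induction L using List.reverseRecOn with
  | nil => rfl
  | append_singleton L t ih =>
      rw [List.foldl_append, List.foldl_cons, List.foldl_nil, ih]
      by_cases hc : t.1 ∈ pvKeys L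
      · -- t.1 is an already-seen creator
        have hks : pvKeys (L ++ [t]) = pvKeys L := by rw [pv_keys_snoc, if_pos hc]
        have hvs : pvPairs L t.1 ≠ [] := pv_pairs_ne_nil L t.1 hc
        have hget : (pvRes L).get? t.1 = some (pvTriple (pvPairs L t.1)) := by
          unfold pvRes
          rw [pv_get?_mk_map _ _ _ (pv_keys_nodup L), if_pos hc]
        have hpt : pvPairs (L ++ [t]) t.1 = pvPairs L t.1 ++ [pvPair t] := by
          rw [pv_pairs_snoc, if_pos rfl]
        rcases hT : pvTriple (pvPairs L t.1) with ⟨s, b, m⟩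
        rw [hT] at hget
        have hs : s = pvSum (pvPairs L t.1) := by
          rw [← pv_triple_fst, hT]
        unfold pvStepA
        simp only [hget]
        have hres : (if m < t.2.2 then (pvRes L).insert t.1 (s + t.2.2, t.2.1, t.2.2)
              else if m = t.2.2 then
                (pvRes L).insert t.1 (s + t.2.2, (if t.2.1 < b then t.2.1 else b), m)
              else (pvRes L).insert t.1 (s + t.2.2, b, m))
            = (pvRes L).insert t.1 (pvStepT (s, b, m) (pvPair t)) := by
          simp only [pvStepT, pvPair]
          split_ifs <;> rfl
        rw [hres, PySem.Dict.getD_insert_self]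
        have hdict : (pvRes L).insert t.1 (pvStepT (s, b, m) (pvPair t))
            = pvRes (L ++ [t]) := by
          apply PySem.Dict.ext
          rw [PySem.Dict.items_insert_of_contains _ _
            (by rw [pv_res_contains]; simpa using hc)]
          show _ = (pvKeys (L ++ [t])).map (fun c => (c, pvTriple (pvPairs (L ++ [t]) c)))
          rw [hks]
          show ((pvKeys L).map (fun c => (c, pvTriple (pvPairs L c)))).map _ = _
          rw [List.map_map]
          apply List.map_congr_left
          intro k hk
          by_cases hkc : k = t.1
          · subst hkc
            simp only [Function.comp_apply, beq_self_eq_true, if_true]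
            rw [hpt, pv_triple_snoc _ _ hvs, hT]
          · simp only [Function.comp_apply, beq_iff_eq, hkc, if_false]
            rw [pv_pairs_snoc, if_neg (fun h => hkc h.symm), List.append_nil]
        have htot : pvTot (L ++ [t])
            = max (pvTot L) (pvSum (pvPairs (L ++ [t]) t.1)) := by
          unfold pvTot
          rw [hks]
          exact pv_foldl_max_map_update (pvKeys L) (pv_keys_nodup L) t.1 hc _ _ _ _
            (fun k hk hne => by
              rw [pv_pairs_snoc, if_neg (fun h => hne h.symm), List.append_nil])
            (by rw [hpt, pv_peak_snoc _ _ hvs, ← hpt])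
        rw [Prod.mk.injEq]
        refine ⟨hdict, ?_⟩
        rw [htot, pv_stepT_fst, hpt, pv_sum_snoc, ← hs]
        show max (s + t.2.2) (pvTot L) = _
        rw [max_comm]
        rfl
      · -- t.1 is a new creator
        have hks : pvKeys (L ++ [t]) = pvKeys L ++ [t.1] := by
          rw [pv_keys_snoc, if_neg hc]
        have hnil : pvPairs L t.1 = [] := pv_pairs_nil_of_not_mem L t.1 hc
        have hpt : pvPairs (L ++ [t]) t.1 = [pvPair t] := by
          rw [pv_pairs_snoc, if_pos rfl, hnil, List.nil_append]
        have hget : (pvRes L).get? t.1 = none := by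
          unfold pvRes
          rw [pv_get?_mk_map _ _ _ (pv_keys_nodup L), if_neg hc]
        unfold pvStepA
        simp only [hget]
        rw [PySem.Dict.getD_insert_self]
        have hdict : (pvRes L).insert t.1 (t.2.2, t.2.1, t.2.2) = pvRes (L ++ [t]) := by
          apply PySem.Dict.ext
          rw [PySem.Dict.items_insert_of_not_contains _ _
            (by rw [pv_res_contains]; simpa using hc)]
          show _ = (pvKeys (L ++ [t])).map (fun c => (c, pvTriple (pvPairs (L ++ [t]) c)))
          rw [hks, List.map_append, List.map_singleton, hpt]
          congr 1
          · apply List.map_congr_left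
            intro k hk
            have hkc : k ≠ t.1 := fun h => hc (h ▸ hk)
            rw [pv_pairs_snoc, if_neg (fun h => hkc h.symm), List.append_nil]
        rw [Prod.mk.injEq]
        refine ⟨hdict, ?_⟩
        unfold pvTot
        rw [hks, List.map_append, List.map_singleton, pv_foldl_max_snoc, hpt]
        rw [show pvPeak [pvPair t] = t.2.2 from rfl]
        rw [show ((pvKeys L).map fun c => pvPeak (pvPairs (L ++ [t]) c))
              = ((pvKeys L).map fun c => pvPeak (pvPairs L c)) from
          List.map_congr_left (fun k hk => by
            rw [pv_pairs_snoc, if_neg (fun h => hc (by rw [h]; exact hk)),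
                List.append_nil])]
        exact max_comm _ _

-- ---- main theorems ----

theorem pv_A_eq (creators ids : List String) (views : List Int)
    (h1 : creators.length ≤ ids.length) (h2 : creators.length ≤ views.length) :
    mostPopularCreator creators ids views
      = ((pvKeys (pvZ creators ids views)).filter
            (fun c => pvSum (pvPairs (pvZ creators ids views) c) = pvTot (pvZ creators ids views))).map
          (fun c => [c, pvBest (pvPairs (pvZ creators ids views) c)]) := by
  have hfold : (PySem.List.pyRange 0 (creators.length : Int) 1).foldl
      (fun (st : PySem.Dict String (Int × String × Int) × Int) (i : Int) => pvStepA st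
        (PySem.List.pyGetD creators i "", PySem.List.pyGetD ids i "",
         PySem.List.pyGetD views i 0))
      (PySem.Dict.empty, -1)
      = (pvRes (pvZ creators ids views), pvTot (pvZ creators ids views)) := by
    have h := pv_fold_eq_zip creators ids views
      (fun a c idv v => pvStepA a (c, idv, v)) (PySem.Dict.empty, -1) h1 h2
    exact h.trans (pv_A_invariant _)
  have h0 : mostPopularCreator creators ids views =
      (pvRes (pvZ creators ids views)).items.foldl
        (fun acc p => if p.2.1 = pvTot (pvZ creators ids views)
                      then acc ++ [[p.1, p.2.2.1]] else acc) [] := by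
    show ((PySem.List.pyRange 0 (creators.length : Int) 1).foldl
      (fun (st : PySem.Dict String (Int × String × Int) × Int) (i : Int) => pvStepA st
        (PySem.List.pyGetD creators i "", PySem.List.pyGetD ids i "",
         PySem.List.pyGetD views i 0))
      (PySem.Dict.empty, -1)).1.items.foldl
        (fun acc p => if p.2.1 = ((PySem.List.pyRange 0 (creators.length : Int) 1).foldl
          (fun (st : PySem.Dict String (Int × String × Int) × Int) (i : Int) => pvStepA st
            (PySem.List.pyGetD creators i "", PySem.List.pyGetD ids i "",
             PySem.List.pyGetD views i 0))
          (PySem.Dict.empty, -1)).2 then acc ++ [[p.1, p.2.2.1]] else acc) [] = _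
    rw [hfold]
  rw [h0, PySem.List.foldl_append_ite
    (p := fun p : String × Int × String × Int => p.2.1 = pvTot (pvZ creators ids views))
    (f := fun p : String × Int × String × Int => [p.1, p.2.2.1])]
  rw [show (pvRes (pvZ creators ids views)).items
        = (pvKeys (pvZ creators ids views)).map
            (fun c => (c, pvTriple (pvPairs (pvZ creators ids views) c))) from rfl]
  rw [List.filter_map, List.map_map]
  rw [List.filter_congr (fun c hc => by
    simp only [Function.comp_apply]
    rw [pv_triple_fst])]
  rw [List.nil_append]
  apply List.map_congr_left
  intro c hc
  have hcm : c ∈ pvKeys (pvZ creators ids views) := List.mem_of_mem_filter hc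
  have hne := pv_pairs_ne_nil _ _ hcm
  simp only [Function.comp_apply]
  rw [show (pvTriple (pvPairs (pvZ creators ids views) c)).2.1
        = pvBest (pvPairs (pvZ creators ids views) c) by
    rw [pv_triple_best _ hne]]

-- ---- B-side: the two passes and their invariants ----

def pvStepPop (st : PySem.Dict String Int × Int) (t : String × String × Int) :
    PySem.Dict String Int × Int :=
  let d := st.1.insert t.1 (st.1.getD t.1 0 + t.2.2)
  (d, max st.2 (d.getD t.1 0))

def pvStepBest (b : PySem.Dict String (Int × String)) (t : String × String × Int) :
    PySem.Dict String (Int × String) :=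
  match b.get? t.1 with
  | none => b.insert t.1 (t.2.2, t.2.1)
  | some mi =>
      if mi.1 < t.2.2 ∨ (t.2.2 = mi.1 ∧ t.2.1 < mi.2) then b.insert t.1 (t.2.2, t.2.1)
      else b

def pvPop (L : List (String × String × Int)) : PySem.Dict String Int :=
  PySem.Dict.mk ((pvKeys L).map (fun c => (c, pvSum (pvPairs L c))))
def pvBestD (L : List (String × String × Int)) : PySem.Dict String (Int × String) :=
  PySem.Dict.mk ((pvKeys L).map (fun c => (c, (pvMax (pvPairs L c), pvBest (pvPairs L c)))))

theorem pv_mk_map_keys {ν : Type} (ks : List String) (f : String → ν) :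
    (PySem.Dict.mk (ks.map (fun c => (c, f c)))).keys = ks := by
  unfold PySem.Dict.keys
  simp [Function.comp_def]

theorem pv_mk_map_contains {ν : Type} (ks : List String) (f : String → ν) (c : String) :
    (PySem.Dict.mk (ks.map (fun c => (c, f c)))).contains c = decide (c ∈ ks) := by
  rw [PySem.Dict.contains_eq_decide_mem_keys, pv_mk_map_keys]

theorem pv_mk_map_getD {ν : Type} (ks : List String) (f : String → ν) (c : String)
    (hnd : ks.Nodup) (hc : c ∈ ks) (d0 : ν) :
    (PySem.Dict.mk (ks.map (fun c => (c, f c)))).getD c d0 = f c := by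
  rw [PySem.Dict.getD_eq_get?_getD, pv_get?_mk_map _ _ _ hnd, if_pos hc]
  rfl

-- fold over zip(creators, views) = fold over the triple zip, forgetting ids
theorem pv_zip2_fold {S : Type} (f : S → String × Int → S) :
    ∀ (cs is : List String) (vs : List Int) (init : S), cs.length ≤ is.length →
      (cs.zip vs).foldl f init
        = (cs.zip (is.zip vs)).foldl (fun a t => f a (t.1, t.2.2)) init := by
  intro cs
  induction cs with
  | nil => intro is vs init _; simp
  | cons c cs ih =>
      intro is vs init h1
      cases is with
      | nil => simp at h1
      | cons i is =>
        cases vs with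
        | nil => simp
        | cons v vs =>
            simp only [List.zip_cons_cons, List.foldl_cons]
            exact ih is vs _ (by simpa using h1)

theorem pv_pop_invariant (L : List (String × String × Int)) :
    L.foldl pvStepPop (PySem.Dict.empty, -1) = (pvPop L, pvTot L) := by
  induction L using List.reverseRecOn with
  | nil => rfl
  | append_singleton L t ih =>
      rw [List.foldl_append, List.foldl_cons, List.foldl_nil, ih]
      have hknd := pv_keys_nodup L
      by_cases hc : t.1 ∈ pvKeys L
      · have hks : pvKeys (L ++ [t]) = pvKeys L := by rw [pv_keys_snoc, if_pos hc]
        have hpt : pvPairs (L ++ [t]) t.1 = pvPairs L t.1 ++ [pvPair t] := by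
          rw [pv_pairs_snoc, if_pos rfl]
        have hvs : pvPairs L t.1 ≠ [] := pv_pairs_ne_nil L t.1 hc
        have hgd : (pvPop L).getD t.1 0 = pvSum (pvPairs L t.1) :=
          pv_mk_map_getD _ _ _ hknd hc 0
        unfold pvStepPop
        simp only [hgd, PySem.Dict.getD_insert_self]
        have hdict : (pvPop L).insert t.1 (pvSum (pvPairs L t.1) + t.2.2)
            = pvPop (L ++ [t]) := by
          apply PySem.Dict.ext
          rw [PySem.Dict.items_insert_of_contains _ _
            (by rw [show (pvPop L).contains t.1 = decide (t.1 ∈ pvKeys L) from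
                pv_mk_map_contains _ _ _]; simpa using hc)]
          show _ = (pvKeys (L ++ [t])).map (fun c => (c, pvSum (pvPairs (L ++ [t]) c)))
          rw [hks]
          show ((pvKeys L).map (fun c => (c, pvSum (pvPairs L c)))).map _ = _
          rw [List.map_map]
          apply List.map_congr_left
          intro k hk
          by_cases hkc : k = t.1
          · subst hkc
            simp only [Function.comp_apply, beq_self_eq_true, if_true]
            rw [hpt, pv_sum_snoc]
            rfl
          · simp only [Function.comp_apply, beq_iff_eq, hkc, if_false]
            rw [pv_pairs_snoc, if_neg (fun h => hkc h.symm), List.append_nil]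
        have htot : pvTot (L ++ [t])
            = max (pvTot L) (pvSum (pvPairs (L ++ [t]) t.1)) := by
          unfold pvTot
          rw [hks]
          exact pv_foldl_max_map_update (pvKeys L) hknd t.1 hc _ _ _ _
            (fun k hk hne => by
              rw [pv_pairs_snoc, if_neg (fun h => hne h.symm), List.append_nil])
            (by rw [hpt, pv_peak_snoc _ _ hvs, ← hpt])
        rw [Prod.mk.injEq]
        exact ⟨hdict, by rw [htot, hpt, pv_sum_snoc]; rfl⟩
      · have hks : pvKeys (L ++ [t]) = pvKeys L ++ [t.1] := by
          rw [pv_keys_snoc, if_neg hc]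
        have hnil : pvPairs L t.1 = [] := pv_pairs_nil_of_not_mem L t.1 hc
        have hpt : pvPairs (L ++ [t]) t.1 = [pvPair t] := by
          rw [pv_pairs_snoc, if_pos rfl, hnil, List.nil_append]
        have hgd : (pvPop L).getD t.1 0 = 0 := by
          apply PySem.Dict.getD_of_not_contains
          rw [show (pvPop L).contains t.1 = decide (t.1 ∈ pvKeys L) from
            pv_mk_map_contains _ _ _]
          simpa using hc
        unfold pvStepPop
        simp only [hgd, PySem.Dict.getD_insert_self, zero_add]
        have hdict : (pvPop L).insert t.1 t.2.2 = pvPop (L ++ [t]) := by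
          apply PySem.Dict.ext
          rw [PySem.Dict.items_insert_of_not_contains _ _
            (by rw [show (pvPop L).contains t.1 = decide (t.1 ∈ pvKeys L) from
                pv_mk_map_contains _ _ _]; simpa using hc)]
          show _ = (pvKeys (L ++ [t])).map (fun c => (c, pvSum (pvPairs (L ++ [t]) c)))
          rw [hks, List.map_append, List.map_singleton, hpt]
          congr 1
          · apply List.map_congr_left
            intro k hk
            have hkc : k ≠ t.1 := fun h => hc (h ▸ hk)
            rw [pv_pairs_snoc, if_neg (fun h => hkc h.symm), List.append_nil]
          · show _ = [(t.1, pvSum [pvPair t])]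
            simp [pvSum, pvPair]
        rw [Prod.mk.injEq]
        refine ⟨hdict, ?_⟩
        unfold pvTot
        rw [hks, List.map_append, List.map_singleton, pv_foldl_max_snoc, hpt]
        rw [show pvPeak [pvPair t] = t.2.2 from rfl]
        rw [show ((pvKeys L).map fun c => pvPeak (pvPairs (L ++ [t]) c))
              = ((pvKeys L).map fun c => pvPeak (pvPairs L c)) from
          List.map_congr_left (fun k hk => by
            rw [pv_pairs_snoc, if_neg (fun h => hc (by rw [h]; exact hk)),
                List.append_nil])]

-- the (max view, min id on ties) pair after one more video
theorem pv_mb_snoc (vs : List (Int × String)) (q : Int × String) (h : vs ≠ []) :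
    (pvMax (vs ++ [q]), pvBest (vs ++ [q]))
      = if pvMax vs < q.1 ∨ (q.1 = pvMax vs ∧ q.2 < pvBest vs) then (q.1, q.2)
        else (pvMax vs, pvBest vs) := by
  have h' : vs ++ [q] ≠ [] := by simp
  have h1 := pv_triple_best (vs ++ [q]) h'
  rw [pv_triple_snoc vs q h] at h1
  rcases hT : pvTriple vs with ⟨s, b, m⟩
  have h2 := pv_triple_best vs h
  rw [hT] at h1 h2
  simp only [Prod.mk.injEq] at h2
  obtain ⟨hb, hm⟩ := h2
  subst hb; subst hm
  unfold pvStepT at h1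
  simp only at h1
  rcases lt_trichotomy (pvMax vs) q.1 with hlt | heq | hgt
  · rw [if_pos hlt] at h1
    simp only [Prod.mk.injEq] at h1
    rw [if_pos (Or.inl hlt), ← h1.1, ← h1.2]
  · rw [if_neg (by omega), if_pos heq] at h1
    simp only [Prod.mk.injEq] at h1
    by_cases hq : q.2 < pvBest vs
    · rw [if_pos hq] at h1
      rw [if_pos (Or.inr ⟨heq.symm, hq⟩), ← h1.1, ← h1.2, heq]
    · rw [if_neg hq] at h1
      rw [if_neg (by rintro (hc | ⟨-, hc2⟩); exacts [absurd hc (by omega), hq hc2]),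
          ← h1.1, ← h1.2]
  · rw [if_neg (by omega), if_neg (by omega)] at h1
    simp only [Prod.mk.injEq] at h1
    rw [if_neg (by rintro (hc | ⟨hc1, -⟩) <;> omega), ← h1.1, ← h1.2]

theorem pv_best_invariant (L : List (String × String × Int)) :
    L.foldl pvStepBest PySem.Dict.empty = pvBestD L := by
  induction L using List.reverseRecOn with
  | nil => rfl
  | append_singleton L t ih =>
      rw [List.foldl_append, List.foldl_cons, List.foldl_nil, ih]
      have hknd := pv_keys_nodup L
      by_cases hc : t.1 ∈ pvKeys L
      · have hks : pvKeys (L ++ [t]) = pvKeys L := by rw [pv_keys_snoc, if_pos hc]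
        have hpt : pvPairs (L ++ [t]) t.1 = pvPairs L t.1 ++ [pvPair t] := by
          rw [pv_pairs_snoc, if_pos rfl]
        have hvs : pvPairs L t.1 ≠ [] := pv_pairs_ne_nil L t.1 hc
        have hget : (pvBestD L).get? t.1
            = some (pvMax (pvPairs L t.1), pvBest (pvPairs L t.1)) := by
          unfold pvBestD
          rw [pv_get?_mk_map _ _ _ hknd, if_pos hc]
        have hsn : (pvMax (pvPairs (L ++ [t]) t.1), pvBest (pvPairs (L ++ [t]) t.1))
            = if pvMax (pvPairs L t.1) < t.2.2 ∨
                (t.2.2 = pvMax (pvPairs L t.1) ∧ t.2.1 < pvBest (pvPairs L t.1))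
              then (t.2.2, t.2.1) else (pvMax (pvPairs L t.1), pvBest (pvPairs L t.1)) := by
          rw [hpt]; exact pv_mb_snoc (pvPairs L t.1) (pvPair t) hvs
        unfold pvStepBest
        simp only [hget]
        have hothers : ∀ k ∈ pvKeys L, k ≠ t.1 →
            pvPairs (L ++ [t]) k = pvPairs L k := fun k hk hne => by
          rw [pv_pairs_snoc, if_neg (fun h => hne h.symm), List.append_nil]
        by_cases hcond : pvMax (pvPairs L t.1) < t.2.2 ∨
            (t.2.2 = pvMax (pvPairs L t.1) ∧ t.2.1 < pvBest (pvPairs L t.1))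
        · rw [if_pos hcond]
          rw [if_pos hcond] at hsn
          apply PySem.Dict.ext
          rw [PySem.Dict.items_insert_of_contains _ _
            (by rw [show (pvBestD L).contains t.1 = decide (t.1 ∈ pvKeys L) from
                pv_mk_map_contains _ _ _]; simpa using hc)]
          show _ = (pvKeys (L ++ [t])).map
            (fun c => (c, (pvMax (pvPairs (L ++ [t]) c), pvBest (pvPairs (L ++ [t]) c))))
          rw [hks]
          show ((pvKeys L).map
            (fun c => (c, (pvMax (pvPairs L c), pvBest (pvPairs L c))))).map _ = _
          rw [List.map_map]
          apply List.map_congr_left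
          intro k hk
          by_cases hkc : k = t.1
          · subst hkc
            simp only [Function.comp_apply, beq_self_eq_true, if_true]
            rw [hsn]
          · simp only [Function.comp_apply, beq_iff_eq, hkc, if_false]
            rw [hothers k hk hkc]
        · rw [if_neg hcond]
          rw [if_neg hcond] at hsn
          apply PySem.Dict.ext
          show _ = (pvKeys (L ++ [t])).map
            (fun c => (c, (pvMax (pvPairs (L ++ [t]) c), pvBest (pvPairs (L ++ [t]) c))))
          rw [hks]
          show (pvKeys L).map
            (fun c => (c, (pvMax (pvPairs L c), pvBest (pvPairs L c)))) = _
          apply List.map_congr_left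
          intro k hk
          by_cases hkc : k = t.1
          · subst hkc
            rw [hsn]
          · rw [hothers k hk hkc]
      · have hks : pvKeys (L ++ [t]) = pvKeys L ++ [t.1] := by
          rw [pv_keys_snoc, if_neg hc]
        have hnil : pvPairs L t.1 = [] := pv_pairs_nil_of_not_mem L t.1 hc
        have hpt : pvPairs (L ++ [t]) t.1 = [pvPair t] := by
          rw [pv_pairs_snoc, if_pos rfl, hnil, List.nil_append]
        have hget : (pvBestD L).get? t.1 = none := by
          unfold pvBestD
          rw [pv_get?_mk_map _ _ _ hknd, if_neg hc]
        unfold pvStepBest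
        simp only [hget]
        apply PySem.Dict.ext
        rw [PySem.Dict.items_insert_of_not_contains _ _
          (by rw [show (pvBestD L).contains t.1 = decide (t.1 ∈ pvKeys L) from
              pv_mk_map_contains _ _ _]; simpa using hc)]
        show _ = (pvKeys (L ++ [t])).map
          (fun c => (c, (pvMax (pvPairs (L ++ [t]) c), pvBest (pvPairs (L ++ [t]) c))))
        rw [hks, List.map_append, List.map_singleton, hpt]
        congr 1
        · apply List.map_congr_left
          intro k hk
          have hkc : k ≠ t.1 := fun h => hc (h ▸ hk)
          rw [pv_pairs_snoc, if_neg (fun h => hkc h.symm), List.append_nil]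
        · show _ = [(t.1, (pvMax [pvPair t], pvBest [pvPair t]))]
          simp [pvMax, pvBest, pvBestList, pvPair]

theorem pv_B_eq (creators ids : List String) (views : List Int)
    (h1 : creators.length ≤ ids.length) :
    mostPopularCreator_alt creators ids views
      = ((pvKeys (pvZ creators ids views)).filter
            (fun c => pvSum (pvPairs (pvZ creators ids views) c) = pvTot (pvZ creators ids views))).map
          (fun c => [c, pvBest (pvPairs (pvZ creators ids views) c)]) := by
  have hpop : (creators.zip views).foldl
      (fun (st : PySem.Dict String Int × Int) p =>
        (st.1.insert p.1 (st.1.getD p.1 0 + p.2),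
         max st.2 ((st.1.insert p.1 (st.1.getD p.1 0 + p.2)).getD p.1 0)))
      (PySem.Dict.empty, -1)
      = (pvPop (pvZ creators ids views), pvTot (pvZ creators ids views)) := by
    rw [pv_zip2_fold _ creators ids views _ h1]
    exact pv_pop_invariant _
  have hbest : (creators.zip (ids.zip views)).foldl
      (fun (b : PySem.Dict String (Int × String)) (t : String × String × Int) =>
        match b.get? t.1 with
        | none => b.insert t.1 (t.2.2, t.2.1)
        | some mi =>
            if mi.1 < t.2.2 ∨ (t.2.2 = mi.1 ∧ t.2.1 < mi.2) then b.insert t.1 (t.2.2, t.2.1)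
            else b)
      PySem.Dict.empty
      = pvBestD (pvZ creators ids views) :=
    pv_best_invariant _
  have h0 : mostPopularCreator_alt creators ids views
      = (pvPop (pvZ creators ids views)).items.foldl
          (fun acc p => if p.2 = pvTot (pvZ creators ids views)
            then acc ++ [[p.1, ((pvBestD (pvZ creators ids views)).getD p.1 (0, "")).2]]
            else acc) [] := by
    show ((creators.zip views).foldl
        (fun (st : PySem.Dict String Int × Int) p =>
          (st.1.insert p.1 (st.1.getD p.1 0 + p.2),
           max st.2 ((st.1.insert p.1 (st.1.getD p.1 0 + p.2)).getD p.1 0)))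
        (PySem.Dict.empty, -1)).1.items.foldl
        (fun acc p => if p.2 = ((creators.zip views).foldl
            (fun (st : PySem.Dict String Int × Int) p =>
              (st.1.insert p.1 (st.1.getD p.1 0 + p.2),
               max st.2 ((st.1.insert p.1 (st.1.getD p.1 0 + p.2)).getD p.1 0)))
            (PySem.Dict.empty, -1)).2
          then acc ++ [[p.1, (((creators.zip (ids.zip views)).foldl
              (fun (b : PySem.Dict String (Int × String)) (t : String × String × Int) =>
                match b.get? t.1 with
                | none => b.insert t.1 (t.2.2, t.2.1)
                | some mi =>
                    if mi.1 < t.2.2 ∨ (t.2.2 = mi.1 ∧ t.2.1 < mi.2) then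
                      b.insert t.1 (t.2.2, t.2.1)
                    else b)
              PySem.Dict.empty).getD p.1 (0, "")).2]]
          else acc) [] = _
    rw [hpop, hbest]
  rw [h0]
  rw [show (pvPop (pvZ creators ids views)).items
        = (pvKeys (pvZ creators ids views)).map
            (fun c => (c, pvSum (pvPairs (pvZ creators ids views) c))) from rfl]
  rw [PySem.List.foldl_append_ite
    (p := fun p : String × Int => p.2 = pvTot (pvZ creators ids views))
    (f := fun p : String × Int =>
      [p.1, ((pvBestD (pvZ creators ids views)).getD p.1 (0, "")).2]), List.nil_append]
  rw [List.filter_map, List.map_map]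
  apply List.map_congr_left
  intro c hc
  have hcm : c ∈ pvKeys (pvZ creators ids views) := List.mem_of_mem_filter hc
  simp only [Function.comp_apply]
  rw [show (pvBestD (pvZ creators ids views)).getD c (0, "")
        = (pvMax (pvPairs (pvZ creators ids views) c),
           pvBest (pvPairs (pvZ creators ids views) c)) from
    pv_mk_map_getD _ _ _ (pv_keys_nodup _) hcm _]

-- ===== VERDICT (by name: the statement is the Claim_ definition above) =====
theorem mostPopularCreator_spec : Claim_equal_mostPopularCreator := by
  intro creators ids views _ hpre
  unfold Spec_mostPopularCreator
  rw [pv_A_eq creators ids views hpre.1 hpre.2, pv_B_eq creators ids views hpre.1]
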